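-- pv_equiv track=rewrite | github.com/MrBrantCode/unitest_baseline | mut_generate/mist_train_taco/taco_10082/solution.py | min_possible_value_after_swaps
-- ===== SOURCE A (Python) =====
-- def min_possible_value_after_swaps(A, B):
--     N = len(A)
--
--     # Swap elements in A and B such that A[i] >= B[i] for all i
--     for i in range(N):
--         if A[i] < B[i]:
--             A[i], B[i] = B[i], A[i]
--
--     # Create a combined array of pairs (A[i], B[i]) and sort it
--     combined = [(A[i], B[i]) for i in range(N)]
--     combined.sort()
--
--     # Initialize min and max arrays for A and B
--     arr1Min = [0] * N
--     arr1Max = [0] * N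
--     arr2Min = [0] * N
--     arr2Max = [0] * N
--
--     # Fill the min and max arrays for A
--     arr1Min[0] = combined[0][0]
--     arr1Max[0] = combined[0][0]
--     for i in range(1, N):
--         arr1Min[i] = min(arr1Min[i - 1], combined[i][0])
--         arr1Max[i] = max(arr1Max[i - 1], combined[i][0])
--
--     # Fill the min and max arrays for B
--     arr2Min[N - 1] = combined[N - 1][1]
--     arr2Max[N - 1] = combined[N - 1][1]
--     for i in range(N - 2, -1, -1):
--         arr2Min[i] = min(arr2Min[i + 1], combined[i][1])
--         arr2Max[i] = max(arr2Max[i + 1], combined[i][1])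
--
--     # Calculate the minimum possible value of (A_max - A_min)
--     ans = combined[N - 1][0] - combined[0][0]
--     for i in range(N - 1, -1, -1):
--         if i == 0:
--             maximum = arr2Max[0]
--             minimum = arr2Min[0]
--         else:
--             maximum = max(arr1Max[i - 1], arr2Max[i])
--             minimum = min(arr1Min[i - 1], arr2Min[i])
--         ans = min(ans, maximum - minimum)
--
--     return ans
-- ===== SOURCE B (Python) =====
-- def min_possible_value_after_swaps(A, B):
--     N = len(A)
--
--     # Same in-place normalisation as the original: ensure A[i] >= B[i]
--     for i in range(N):
--         if A[i] < B[i]: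
--             A[i], B[i] = B[i], A[i]
--
--     pairs = sorted(zip(A, B))
--
--     # Since pairs is sorted, the prefix [0..i-1] of first components has
--     # min = pairs[0][0] and max = pairs[i-1][0]: no prefix arrays or
--     # accumulators are needed.  One backward sweep keeps scalar suffix
--     # min/max of the second components and evaluates each split directly.
--     lo = pairs[0][0]
--     best = pairs[N - 1][0] - lo
--     sufMin = sufMax = pairs[N - 1][1]
--     for i in range(N - 1, 0, -1):
--         sufMin = min(sufMin, pairs[i][1])
--         sufMax = max(sufMax, pairs[i][1])
--         best = min(best, max(pairs[i - 1][0], sufMax) - min(lo, sufMin))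
--     sufMin = min(sufMin, pairs[0][1])
--     sufMax = max(sufMax, pairs[0][1])
--     return min(best, sufMax - sufMin)
-- ===== Notes on version B (the rewrite author's own statement) =====
-- stated objective: simpler
-- what changed: Drops all four prefix/suffix min-max arrays and the extra loops: because the pair list is sorted, the prefix of first components has min pairs[0][0] and max pairs[i-1][0] for free, so a single backward sweep with two scalar suffix accumulators evaluates every split directly.
import Mathlib
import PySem

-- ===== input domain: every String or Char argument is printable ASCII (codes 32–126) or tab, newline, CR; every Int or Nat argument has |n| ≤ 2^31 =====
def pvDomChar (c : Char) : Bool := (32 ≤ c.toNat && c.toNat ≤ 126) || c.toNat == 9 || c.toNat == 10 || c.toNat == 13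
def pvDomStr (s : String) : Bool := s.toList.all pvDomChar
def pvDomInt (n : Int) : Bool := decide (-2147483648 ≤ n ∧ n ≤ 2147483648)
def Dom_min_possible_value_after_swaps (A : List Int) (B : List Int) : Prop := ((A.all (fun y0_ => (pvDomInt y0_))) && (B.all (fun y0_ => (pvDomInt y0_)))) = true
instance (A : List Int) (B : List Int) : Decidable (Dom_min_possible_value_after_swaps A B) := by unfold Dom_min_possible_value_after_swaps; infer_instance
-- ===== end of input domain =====

-- B keeps A's in-place swap normalisation (both Pythons mutate A and B identically) but replaces
-- A's four prefix/suffix min-max arrays and separate answer loop by a single backward sweep with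
-- two scalar suffix accumulators, using that the sorted pair list is nondecreasing in its first
-- component (objective: simpler). Equivalence is about the return value.

-- ===== PORT A =====
def min_possible_value_after_swaps (A : List Int) (B : List Int) : Int :=
  let N : Int := A.length
  let st := (PySem.List.pyRange 0 N 1).foldl
    (fun (st : List Int × List Int) i =>
      if PySem.List.pyGetD st.1 i 0 < PySem.List.pyGetD st.2 i 0 then
        (PySem.List.pySetD st.1 i (PySem.List.pyGetD st.2 i 0),
         PySem.List.pySetD st.2 i (PySem.List.pyGetD st.1 i 0))
      else st) (A, B)
  let combined := PySem.List.sorted2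
    ((PySem.List.pyRange 0 N 1).map (fun i =>
      (PySem.List.pyGetD st.1 i 0, PySem.List.pyGetD st.2 i 0)))
    (fun p => p.1) (fun p => p.2) false
  let arr1 := (PySem.List.pyRange 1 N 1).foldl
    (fun (p : List Int × List Int) i =>
      (PySem.List.pySetD p.1 i (min (PySem.List.pyGetD p.1 (i-1) 0) (PySem.List.pyGetD combined i (0,0)).1),
       PySem.List.pySetD p.2 i (max (PySem.List.pyGetD p.2 (i-1) 0) (PySem.List.pyGetD combined i (0,0)).1)))
    (PySem.List.pySetD (List.replicate N.toNat 0) 0 (PySem.List.pyGetD combined 0 (0,0)).1,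
     PySem.List.pySetD (List.replicate N.toNat 0) 0 (PySem.List.pyGetD combined 0 (0,0)).1)
  let arr2 := (PySem.List.pyRange (N-2) (-1) (-1)).foldl
    (fun (p : List Int × List Int) i =>
      (PySem.List.pySetD p.1 i (min (PySem.List.pyGetD p.1 (i+1) 0) (PySem.List.pyGetD combined i (0,0)).2),
       PySem.List.pySetD p.2 i (max (PySem.List.pyGetD p.2 (i+1) 0) (PySem.List.pyGetD combined i (0,0)).2)))
    (PySem.List.pySetD (List.replicate N.toNat 0) (N-1) (PySem.List.pyGetD combined (N-1) (0,0)).2,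
     PySem.List.pySetD (List.replicate N.toNat 0) (N-1) (PySem.List.pyGetD combined (N-1) (0,0)).2)
  let ans0 := (PySem.List.pyGetD combined (N-1) (0,0)).1 - (PySem.List.pyGetD combined 0 (0,0)).1
  (PySem.List.pyRange (N-1) (-1) (-1)).foldl
    (fun ans i =>
      let maximum := if i == 0 then PySem.List.pyGetD arr2.2 0 0
        else max (PySem.List.pyGetD arr1.2 (i-1) 0) (PySem.List.pyGetD arr2.2 i 0)
      let minimum := if i == 0 then PySem.List.pyGetD arr2.1 0 0
        else min (PySem.List.pyGetD arr1.1 (i-1) 0) (PySem.List.pyGetD arr2.1 i 0)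
      min ans (maximum - minimum)) ans0

-- ===== PORT B =====
def min_possible_value_after_swaps_alt (A : List Int) (B : List Int) : Int :=
  let N : Int := A.length
  let st := (PySem.List.pyRange 0 N 1).foldl
    (fun (st : List Int × List Int) i =>
      if PySem.List.pyGetD st.1 i 0 < PySem.List.pyGetD st.2 i 0 then
        (PySem.List.pySetD st.1 i (PySem.List.pyGetD st.2 i 0),
         PySem.List.pySetD st.2 i (PySem.List.pyGetD st.1 i 0))
      else st) (A, B)
  let pairs := PySem.List.sorted2 (st.1.zip st.2) (fun p => p.1) (fun p => p.2) false
  let lo := (PySem.List.pyGetD pairs 0 (0,0)).1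
  let best := (PySem.List.pyGetD pairs (N-1) (0,0)).1 - lo
  let r := (PySem.List.pyRange (N-1) 0 (-1)).foldl
    (fun (q : Int × Int × Int) i =>
      let m := min q.2.1 (PySem.List.pyGetD pairs i (0,0)).2
      let M := max q.2.2 (PySem.List.pyGetD pairs i (0,0)).2
      (min q.1 (max (PySem.List.pyGetD pairs (i-1) (0,0)).1 M - min lo m), m, M))
    (best, (PySem.List.pyGetD pairs (N-1) (0,0)).2, (PySem.List.pyGetD pairs (N-1) (0,0)).2)
  min r.1 (max r.2.2 (PySem.List.pyGetD pairs 0 (0,0)).2 - min r.2.1 (PySem.List.pyGetD pairs 0 (0,0)).2)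

-- ===== PRECONDITION & SPEC =====
-- Pre_ excludes exactly the inputs where the Python A raises IndexError: the empty A
-- (the arrays are empty and arr1Min[0] fails) and len(B) < len(A) (B[i] fails in the swap loop).
def Pre_min_possible_value_after_swaps (A : List Int) (B : List Int) : Prop :=
  A ≠ [] ∧ A.length ≤ B.length
instance (A : List Int) (B : List Int) : Decidable (Pre_min_possible_value_after_swaps A B) := by
  unfold Pre_min_possible_value_after_swaps; infer_instance
def pvWitness_min_possible_value_after_swaps : List Int × List Int := ([1, 5, 3], [4, 2, 9])

def Spec_min_possible_value_after_swaps (A : List Int) (B : List Int) (out : Int) : Prop := out = min_possible_value_after_swaps_alt A B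
instance (A : List Int) (B : List Int) (out : Int) : Decidable (Spec_min_possible_value_after_swaps A B out) := by unfold Spec_min_possible_value_after_swaps; infer_instance

-- ===== CLAIM (what is proved, stated in full; the proofs are below) =====
def Claim_equal_min_possible_value_after_swaps : Prop := ∀ (A : List Int) (B : List Int), Dom_min_possible_value_after_swaps A B → Pre_min_possible_value_after_swaps A B → Spec_min_possible_value_after_swaps A B (min_possible_value_after_swaps A B)

-- ===== LEMMAS AND PROOFS =====

-- prefix min/max of the first components of the sorted pair list
def pvPMin (c : List (Int × Int)) : Nat → Int
  | 0 => (c.getD 0 (0,0)).1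
  | k+1 => min (pvPMin c k) (c.getD (k+1) (0,0)).1
def pvPMax (c : List (Int × Int)) : Nat → Int
  | 0 => (c.getD 0 (0,0)).1
  | k+1 => max (pvPMax c k) (c.getD (k+1) (0,0)).1

-- suffix min/max of the second components
def pvSAuxMin : List (Int × Int) → Int
  | [] => 0
  | [x] => x.2
  | x :: y :: t => min (pvSAuxMin (y :: t)) x.2
def pvSAuxMax : List (Int × Int) → Int
  | [] => 0
  | [x] => x.2
  | x :: y :: t => max (pvSAuxMax (y :: t)) x.2
def pvSMin (c : List (Int × Int)) (k : Nat) : Int := pvSAuxMin (c.drop k)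
def pvSMax (c : List (Int × Int)) (k : Nat) : Int := pvSAuxMax (c.drop k)

-- the candidate value considered for split index i in both programs
def pvCand (c : List (Int × Int)) (i : Int) : Int :=
  (if i == 0 then pvSMax c 0 else max (pvPMax c (i-1).toNat) (pvSMax c i.toNat)) -
  (if i == 0 then pvSMin c 0 else min (pvPMin c (i-1).toNat) (pvSMin c i.toNat))

-- common reference form: running minimum of all candidates, split index increasing
def pvRef (c : List (Int × Int)) (N : Int) : Int :=
  (PySem.List.pyRange 0 N 1).foldl (fun ans i => min ans (pvCand c i))
    ((c.getD (N-1).toNat (0,0)).1 - (c.getD 0 (0,0)).1)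

-- the tails of the two ports after the (shared) swap loop and sort
def pvTailA (c : List (Int × Int)) (N : Int) : Int :=
  let arr1 := (PySem.List.pyRange 1 N 1).foldl
    (fun (p : List Int × List Int) i =>
      (PySem.List.pySetD p.1 i (min (PySem.List.pyGetD p.1 (i-1) 0) (PySem.List.pyGetD c i (0,0)).1),
       PySem.List.pySetD p.2 i (max (PySem.List.pyGetD p.2 (i-1) 0) (PySem.List.pyGetD c i (0,0)).1)))
    (PySem.List.pySetD (List.replicate N.toNat 0) 0 (PySem.List.pyGetD c 0 (0,0)).1,
     PySem.List.pySetD (List.replicate N.toNat 0) 0 (PySem.List.pyGetD c 0 (0,0)).1)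
  let arr2 := (PySem.List.pyRange (N-2) (-1) (-1)).foldl
    (fun (p : List Int × List Int) i =>
      (PySem.List.pySetD p.1 i (min (PySem.List.pyGetD p.1 (i+1) 0) (PySem.List.pyGetD c i (0,0)).2),
       PySem.List.pySetD p.2 i (max (PySem.List.pyGetD p.2 (i+1) 0) (PySem.List.pyGetD c i (0,0)).2)))
    (PySem.List.pySetD (List.replicate N.toNat 0) (N-1) (PySem.List.pyGetD c (N-1) (0,0)).2,
     PySem.List.pySetD (List.replicate N.toNat 0) (N-1) (PySem.List.pyGetD c (N-1) (0,0)).2)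
  let ans0 := (PySem.List.pyGetD c (N-1) (0,0)).1 - (PySem.List.pyGetD c 0 (0,0)).1
  (PySem.List.pyRange (N-1) (-1) (-1)).foldl
    (fun ans i =>
      let maximum := if i == 0 then PySem.List.pyGetD arr2.2 0 0
        else max (PySem.List.pyGetD arr1.2 (i-1) 0) (PySem.List.pyGetD arr2.2 i 0)
      let minimum := if i == 0 then PySem.List.pyGetD arr2.1 0 0
        else min (PySem.List.pyGetD arr1.1 (i-1) 0) (PySem.List.pyGetD arr2.1 i 0)
      min ans (maximum - minimum)) ans0

def pvTailB (c : List (Int × Int)) (N : Int) : Int :=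
  let r := (PySem.List.pyRange (N-1) 0 (-1)).foldl
    (fun (q : Int × Int × Int) i =>
      (min q.1 (max (PySem.List.pyGetD c (i-1) (0,0)).1 (max q.2.2 (PySem.List.pyGetD c i (0,0)).2) -
         min (PySem.List.pyGetD c 0 (0,0)).1 (min q.2.1 (PySem.List.pyGetD c i (0,0)).2)),
       min q.2.1 (PySem.List.pyGetD c i (0,0)).2,
       max q.2.2 (PySem.List.pyGetD c i (0,0)).2))
    ((PySem.List.pyGetD c (N-1) (0,0)).1 - (PySem.List.pyGetD c 0 (0,0)).1,
     (PySem.List.pyGetD c (N-1) (0,0)).2, (PySem.List.pyGetD c (N-1) (0,0)).2)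
  min r.1 (max r.2.2 (PySem.List.pyGetD c 0 (0,0)).2 - min r.2.1 (PySem.List.pyGetD c 0 (0,0)).2)

-- the shared swap loop and the two sorted pair lists, as the ports compute them
def pvSwap (A B : List Int) : List Int × List Int :=
  (PySem.List.pyRange 0 (A.length : Int) 1).foldl
    (fun (st : List Int × List Int) i =>
      if PySem.List.pyGetD st.1 i 0 < PySem.List.pyGetD st.2 i 0 then
        (PySem.List.pySetD st.1 i (PySem.List.pyGetD st.2 i 0),
         PySem.List.pySetD st.2 i (PySem.List.pyGetD st.1 i 0))
      else st) (A, B)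
def pvCA (A B : List Int) : List (Int × Int) :=
  PySem.List.sorted2
    ((PySem.List.pyRange 0 (A.length : Int) 1).map (fun i =>
      (PySem.List.pyGetD (pvSwap A B).1 i 0, PySem.List.pyGetD (pvSwap A B).2 i 0)))
    (fun p => p.1) (fun p => p.2) false
def pvC (A B : List Int) : List (Int × Int) :=
  PySem.List.sorted2 ((pvSwap A B).1.zip (pvSwap A B).2) (fun p => p.1) (fun p => p.2) false

lemma pvPortA_rfl (A B : List Int) :
    min_possible_value_after_swaps A B = pvTailA (pvCA A B) A.length := rfl
lemma pvPortB_rfl (A B : List Int) :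
    min_possible_value_after_swaps_alt A B = pvTailB (pvC A B) A.length := rfl

lemma pvSMin_last (c : List (Int × Int)) (h : c ≠ []) :
    pvSMin c (c.length - 1) = (c.getD (c.length - 1) (0,0)).2 := by
  have hlt : c.length - 1 < c.length := by
    have := List.length_pos_iff.2 h; omega
  have hd := List.drop_eq_getElem_cons hlt
  have hd2 : c.drop (c.length - 1 + 1) = [] := by
    apply List.drop_eq_nil_of_le; omega
  rw [pvSMin, hd, hd2, List.getD_eq_getElem c (0,0) hlt]
  rfl

lemma pvSMax_last (c : List (Int × Int)) (h : c ≠ []) :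
    pvSMax c (c.length - 1) = (c.getD (c.length - 1) (0,0)).2 := by
  have hlt : c.length - 1 < c.length := by
    have := List.length_pos_iff.2 h; omega
  have hd := List.drop_eq_getElem_cons hlt
  have hd2 : c.drop (c.length - 1 + 1) = [] := by
    apply List.drop_eq_nil_of_le; omega
  rw [pvSMax, hd, hd2, List.getD_eq_getElem c (0,0) hlt]
  rfl

lemma pvSMin_rec (c : List (Int × Int)) (k : Nat) (h : k + 1 < c.length) :
    pvSMin c k = min (pvSMin c (k+1)) (c.getD k (0,0)).2 := by
  have hk : k < c.length := by omega
  have hd := List.drop_eq_getElem_cons hk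
  have hd2 := List.drop_eq_getElem_cons h
  rw [pvSMin, pvSMin, hd, hd2, List.getD_eq_getElem c (0,0) hk]
  rfl

lemma pvSMax_rec (c : List (Int × Int)) (k : Nat) (h : k + 1 < c.length) :
    pvSMax c k = max (pvSMax c (k+1)) (c.getD k (0,0)).2 := by
  have hk : k < c.length := by omega
  have hd := List.drop_eq_getElem_cons hk
  have hd2 := List.drop_eq_getElem_cons h
  rw [pvSMax, pvSMax, hd, hd2, List.getD_eq_getElem c (0,0) hk]
  rfl

-- total indexing into c equals List.getD for in-range nonnegative indices
lemma pvGetDc (c : List (Int × Int)) (i : Int) (h0 : 0 ≤ i) (h1 : i < (c.length : Int)) :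
    PySem.List.pyGetD c i (0,0) = c.getD i.toNat (0,0) := by
  rw [PySem.List.pyGetD_eq_getElem c (0,0) h0 h1, List.getD_eq_getElem c (0,0) (by omega)]

lemma pvSwapLen (idxs : List Int) (a b : List Int) :
    ((idxs.foldl (fun (st : List Int × List Int) i =>
      if PySem.List.pyGetD st.1 i 0 < PySem.List.pyGetD st.2 i 0 then
        (PySem.List.pySetD st.1 i (PySem.List.pyGetD st.2 i 0),
         PySem.List.pySetD st.2 i (PySem.List.pyGetD st.1 i 0))
      else st) (a, b)).1.length = a.length ∧
     (idxs.foldl (fun (st : List Int × List Int) i =>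
      if PySem.List.pyGetD st.1 i 0 < PySem.List.pyGetD st.2 i 0 then
        (PySem.List.pySetD st.1 i (PySem.List.pyGetD st.2 i 0),
         PySem.List.pySetD st.2 i (PySem.List.pyGetD st.1 i 0))
      else st) (a, b)).2.length = b.length) := by
  induction idxs generalizing a b with
  | nil => exact ⟨rfl, rfl⟩
  | cons x t ih =>
    simp only [List.foldl_cons]
    split
    · have := ih (PySem.List.pySetD a x (PySem.List.pyGetD b x 0))
        (PySem.List.pySetD b x (PySem.List.pyGetD a x 0))
      simpa [PySem.List.length_pySetD] using this
    · exact ih a b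

lemma pvZipMapRange (x y : List Int) (h : x.length ≤ y.length) :
    (PySem.List.pyRange 0 (x.length : Int) 1).map
      (fun i => (PySem.List.pyGetD x i 0, PySem.List.pyGetD y i 0)) = x.zip y := by
  apply List.ext_getElem
  · simp [PySem.List.length_pyRange_one]; omega
  · intro k h1 h2
    have hk : k < x.length := by
      simpa [PySem.List.length_pyRange_one] using h1
    have hky : k < y.length := by omega
    simp only [List.getElem_map, PySem.List.getElem_pyRange_one, List.getElem_zip]
    have hx : PySem.List.pyGetD x ((0:Int) + k) 0 = x[k] := by
      rw [zero_add]
      exact_mod_cast PySem.List.pyGetD_ofNat x k 0 hk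
    have hy : PySem.List.pyGetD y ((0:Int) + k) 0 = y[k] := by
      rw [zero_add]
      exact_mod_cast PySem.List.pyGetD_ofNat y k 0 hky
    rw [hx, hy]

-- both ports sort the same pair list
lemma pvCA_eq_pvC (A B : List Int) (h : A.length ≤ B.length) : pvCA A B = pvC A B := by
  have hl := pvSwapLen (PySem.List.pyRange 0 (A.length : Int) 1) A B
  rw [pvCA, pvC]
  congr 1
  have h1 : (pvSwap A B).1.length = A.length := hl.1
  have h2 : (pvSwap A B).2.length = B.length := hl.2
  calc (PySem.List.pyRange 0 (A.length : Int) 1).map (fun i =>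
      (PySem.List.pyGetD (pvSwap A B).1 i 0, PySem.List.pyGetD (pvSwap A B).2 i 0))
      = (PySem.List.pyRange 0 ((pvSwap A B).1.length : Int) 1).map (fun i =>
      (PySem.List.pyGetD (pvSwap A B).1 i 0, PySem.List.pyGetD (pvSwap A B).2 i 0)) := by rw [h1]
    _ = (pvSwap A B).1.zip (pvSwap A B).2 := pvZipMapRange _ _ (by omega)

lemma pvFillFwd (v : Int → Int) (f : Int → Int → Int) (N : Int) (P : Int → Int)
    (hrec : ∀ i : Int, 1 ≤ i → i < N → P i = f (P (i-1)) (v i)) :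
    ∀ (k : Nat) (a : Int) (arr : List Int), a = N - k → 1 ≤ a → arr.length = N.toNat →
    (∀ j : Int, 0 ≤ j → j < a → PySem.List.pyGetD arr j 0 = P j) →
    ∀ j : Int, 0 ≤ j → j < N →
      PySem.List.pyGetD ((PySem.List.pyRange a N 1).foldl
        (fun arr i => PySem.List.pySetD arr i (f (PySem.List.pyGetD arr (i-1) 0) (v i))) arr) j 0 = P j := by
  intro k
  induction k with
  | zero =>
    intro a arr ha h1 hlen hinit j hj0 hjN
    rw [PySem.List.pyRange_one_eq_nil (by omega)]
    exact hinit j hj0 (by omega)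
  | succ k ih =>
    intro a arr ha h1 hlen hinit j hj0 hjN
    by_cases hlt : a < N
    · rw [PySem.List.pyRange_one_cons hlt, List.foldl_cons]
      have hset := PySem.List.pySetD_of_nonneg arr
        (f (PySem.List.pyGetD arr (a-1) 0) (v a)) (by omega : (0:Int) ≤ a)
      refine ih (a + 1) _ (by omega) (by omega) (by rw [hset]; simpa using hlen) ?_ j hj0 hjN
      intro j hj0' hja
      rw [hset, PySem.List.pyGetD_eq_getElem _ 0 hj0'
        (by rw [List.length_set, hlen]; omega), List.getElem_set]
      by_cases hja' : j = a
      · subst hja'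
        rw [if_pos (by omega)]
        have harr : PySem.List.pyGetD arr (j-1) 0 = P (j-1) := hinit (j-1) (by omega) (by omega)
        rw [harr, ← hrec j (by omega) (by omega)]
      · rw [if_neg (by omega)]
        have := hinit j hj0' (by omega)
        rw [PySem.List.pyGetD_eq_getElem arr 0 hj0' (by rw [hlen]; omega)] at this
        exact this
    · rw [PySem.List.pyRange_one_eq_nil (by omega)]
      exact hinit j hj0 (by omega)

lemma pvFillBwd (v : Int → Int) (f : Int → Int → Int) (N : Int) (S : Int → Int)
    (hrec : ∀ i : Int, 0 ≤ i → i ≤ N - 2 → S i = f (S (i+1)) (v i)) :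
    ∀ (k : Nat) (a : Int) (arr : List Int), a = (k : Int) - 1 → a ≤ N - 2 → arr.length = N.toNat →
    (∀ j : Int, a < j → j < N → PySem.List.pyGetD arr j 0 = S j) →
    ∀ j : Int, 0 ≤ j → j < N →
      PySem.List.pyGetD ((PySem.List.pyRange a (-1) (-1)).foldl
        (fun arr i => PySem.List.pySetD arr i (f (PySem.List.pyGetD arr (i+1) 0) (v i))) arr) j 0 = S j := by
  intro k
  induction k with
  | zero =>
    intro a arr ha h2 hlen hinit j hj0 hjN
    rw [PySem.List.pyRange_neg_one_eq_nil (by omega)]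
    exact hinit j (by omega) hjN
  | succ k ih =>
    intro a arr ha h2 hlen hinit j hj0 hjN
    have ha0 : (0:Int) ≤ a := by omega
    rw [PySem.List.pyRange_neg_one_cons (by omega : (-1:Int) < a), List.foldl_cons]
    have hset := PySem.List.pySetD_of_nonneg arr
      (f (PySem.List.pyGetD arr (a+1) 0) (v a)) ha0
    refine ih (a - 1) _ (by omega) (by omega) (by rw [hset]; simpa using hlen) ?_ j hj0 hjN
    intro j hja hjN'
    rw [hset, PySem.List.pyGetD_eq_getElem _ 0 (by omega)
      (by rw [List.length_set, hlen]; omega), List.getElem_set]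
    by_cases hja' : j = a
    · subst hja'
      rw [if_pos (by omega)]
      have harr : PySem.List.pyGetD arr (j+1) 0 = S (j+1) := hinit (j+1) (by omega) (by omega)
      rw [harr, ← hrec j (by omega) (by omega)]
    · rw [if_neg (by omega)]
      have := hinit j (by omega) hjN'
      rw [PySem.List.pyGetD_eq_getElem arr 0 (by omega) (by rw [hlen]; omega)] at this
      exact this

lemma pvFoldlMinComm (l : List Int) : ∀ a b : Int, l.foldl min (min a b) = min b (l.foldl min a) := by
  induction l with
  | nil => intro a b; simp [min_comm]
  | cons x t ih =>
    intro a b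
    simp only [List.foldl_cons]
    rw [show min (min a b) x = min (min a x) b by rw [min_assoc, min_assoc, min_comm b x], ih]

lemma pvFoldlMinReverse (l : List Int) (a : Int) : l.reverse.foldl min a = l.foldl min a := by
  induction l generalizing a with
  | nil => rfl
  | cons x t ih =>
    simp only [List.reverse_cons, List.foldl_append, List.foldl_cons, List.foldl_nil, ih]
    rw [min_comm (t.foldl min a) x, ← pvFoldlMinComm t a x]

-- the four filled arrays, characterised pointwise
lemma pvFwdMinArr (c : List (Int × Int)) (N : Int) (hN : N = c.length) (h1 : 1 ≤ N) :
    ∀ j : Int, 0 ≤ j → j < N →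
      PySem.List.pyGetD ((PySem.List.pyRange 1 N 1).foldl
        (fun arr i => PySem.List.pySetD arr i (min (PySem.List.pyGetD arr (i-1) 0) (PySem.List.pyGetD c i (0,0)).1))
        (PySem.List.pySetD (List.replicate N.toNat 0) 0 (PySem.List.pyGetD c 0 (0,0)).1)) j 0
      = pvPMin c j.toNat := by
  intro j hj0 hjN
  refine pvFillFwd (fun i => (PySem.List.pyGetD c i (0,0)).1) min N (fun i => pvPMin c i.toNat)
    ?_ (N-1).toNat 1 _ (by omega) le_rfl ?_ ?_ j hj0 hjN
  · intro i hi1 hiN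
    show pvPMin c i.toNat = min (pvPMin c (i-1).toNat) ((PySem.List.pyGetD c i (0,0)).1)
    rw [pvGetDc c i (by omega) (by omega)]
    have e : i.toNat = (i-1).toNat + 1 := by omega
    rw [e, pvPMin]
  · rw [PySem.List.pySetD_of_nonneg _ _ le_rfl]
    simp [hN]
  · intro j hj0' hj1
    have hj : j = 0 := by omega
    subst hj
    show PySem.List.pyGetD (PySem.List.pySetD (List.replicate N.toNat 0) 0 (PySem.List.pyGetD c 0 (0,0)).1) 0 0 = pvPMin c (0:Int).toNat
    rw [PySem.List.pySetD_of_nonneg _ _ le_rfl, PySem.List.pyGetD_zero,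
      List.getD_eq_getElem _ _ (by simp; omega), List.getElem_set,
      if_pos (show (0:Int).toNat = 0 from rfl)]
    rw [show (0:Int).toNat = 0 from rfl, pvPMin, PySem.List.pyGetD_zero]

lemma pvFwdMaxArr (c : List (Int × Int)) (N : Int) (hN : N = c.length) (h1 : 1 ≤ N) :
    ∀ j : Int, 0 ≤ j → j < N →
      PySem.List.pyGetD ((PySem.List.pyRange 1 N 1).foldl
        (fun arr i => PySem.List.pySetD arr i (max (PySem.List.pyGetD arr (i-1) 0) (PySem.List.pyGetD c i (0,0)).1))
        (PySem.List.pySetD (List.replicate N.toNat 0) 0 (PySem.List.pyGetD c 0 (0,0)).1)) j 0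
      = pvPMax c j.toNat := by
  intro j hj0 hjN
  refine pvFillFwd (fun i => (PySem.List.pyGetD c i (0,0)).1) max N (fun i => pvPMax c i.toNat)
    ?_ (N-1).toNat 1 _ (by omega) le_rfl ?_ ?_ j hj0 hjN
  · intro i hi1 hiN
    show pvPMax c i.toNat = max (pvPMax c (i-1).toNat) ((PySem.List.pyGetD c i (0,0)).1)
    rw [pvGetDc c i (by omega) (by omega)]
    have e : i.toNat = (i-1).toNat + 1 := by omega
    rw [e, pvPMax]
  · rw [PySem.List.pySetD_of_nonneg _ _ le_rfl]
    simp [hN]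
  · intro j hj0' hj1
    have hj : j = 0 := by omega
    subst hj
    show PySem.List.pyGetD (PySem.List.pySetD (List.replicate N.toNat 0) 0 (PySem.List.pyGetD c 0 (0,0)).1) 0 0 = pvPMax c (0:Int).toNat
    rw [PySem.List.pySetD_of_nonneg _ _ le_rfl, PySem.List.pyGetD_zero,
      List.getD_eq_getElem _ _ (by simp; omega), List.getElem_set,
      if_pos (show (0:Int).toNat = 0 from rfl)]
    rw [show (0:Int).toNat = 0 from rfl, pvPMax, PySem.List.pyGetD_zero]

lemma pvBwdMinArr (c : List (Int × Int)) (N : Int) (hN : N = c.length) (h1 : 1 ≤ N) :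
    ∀ j : Int, 0 ≤ j → j < N →
      PySem.List.pyGetD ((PySem.List.pyRange (N-2) (-1) (-1)).foldl
        (fun arr i => PySem.List.pySetD arr i (min (PySem.List.pyGetD arr (i+1) 0) (PySem.List.pyGetD c i (0,0)).2))
        (PySem.List.pySetD (List.replicate N.toNat 0) (N-1) (PySem.List.pyGetD c (N-1) (0,0)).2)) j 0
      = pvSMin c j.toNat := by
  intro j hj0 hjN
  refine pvFillBwd (fun i => (PySem.List.pyGetD c i (0,0)).2) min N (fun i => pvSMin c i.toNat)
    ?_ (N-1).toNat (N-2) _ (by omega) (by omega) ?_ ?_ j hj0 hjN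
  · intro i hi0 hi2
    show pvSMin c i.toNat = min (pvSMin c (i+1).toNat) ((PySem.List.pyGetD c i (0,0)).2)
    have hrec := pvSMin_rec c i.toNat (by omega)
    rw [pvGetDc c i (by omega) (by omega)]
    have e : (i+1).toNat = i.toNat + 1 := by omega
    rw [e]
    exact hrec
  · rw [PySem.List.pySetD_of_nonneg _ _ (by omega)]
    simp [hN]
  · intro j hja hjN'
    have hj : j = N - 1 := by omega
    subst hj
    show PySem.List.pyGetD (PySem.List.pySetD (List.replicate N.toNat 0) (N-1) (PySem.List.pyGetD c (N-1) (0,0)).2) (N-1) 0 = pvSMin c (N-1).toNat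
    rw [PySem.List.pySetD_of_nonneg _ _ (by omega),
      PySem.List.pyGetD_eq_getElem _ 0 (by omega) (by simp; try omega),
      List.getElem_set, if_pos rfl]
    have hcne : c ≠ [] := by intro hc; rw [hc] at hN; simp at hN; omega
    have e : (N-1).toNat = c.length - 1 := by omega
    rw [pvGetDc c (N-1) (by omega) (by omega), e, pvSMin_last c hcne]

lemma pvBwdMaxArr (c : List (Int × Int)) (N : Int) (hN : N = c.length) (h1 : 1 ≤ N) :
    ∀ j : Int, 0 ≤ j → j < N →
      PySem.List.pyGetD ((PySem.List.pyRange (N-2) (-1) (-1)).foldl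
        (fun arr i => PySem.List.pySetD arr i (max (PySem.List.pyGetD arr (i+1) 0) (PySem.List.pyGetD c i (0,0)).2))
        (PySem.List.pySetD (List.replicate N.toNat 0) (N-1) (PySem.List.pyGetD c (N-1) (0,0)).2)) j 0
      = pvSMax c j.toNat := by
  intro j hj0 hjN
  refine pvFillBwd (fun i => (PySem.List.pyGetD c i (0,0)).2) max N (fun i => pvSMax c i.toNat)
    ?_ (N-1).toNat (N-2) _ (by omega) (by omega) ?_ ?_ j hj0 hjN
  · intro i hi0 hi2
    show pvSMax c i.toNat = max (pvSMax c (i+1).toNat) ((PySem.List.pyGetD c i (0,0)).2)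
    have hrec := pvSMax_rec c i.toNat (by omega)
    rw [pvGetDc c i (by omega) (by omega)]
    have e : (i+1).toNat = i.toNat + 1 := by omega
    rw [e]
    exact hrec
  · rw [PySem.List.pySetD_of_nonneg _ _ (by omega)]
    simp [hN]
  · intro j hja hjN'
    have hj : j = N - 1 := by omega
    subst hj
    show PySem.List.pyGetD (PySem.List.pySetD (List.replicate N.toNat 0) (N-1) (PySem.List.pyGetD c (N-1) (0,0)).2) (N-1) 0 = pvSMax c (N-1).toNat
    rw [PySem.List.pySetD_of_nonneg _ _ (by omega),
      PySem.List.pyGetD_eq_getElem _ 0 (by omega) (by simp; try omega),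
      List.getElem_set, if_pos rfl]
    have hcne : c ≠ [] := by intro hc; rw [hc] at hN; simp at hN; omega
    have e : (N-1).toNat = c.length - 1 := by omega
    rw [pvGetDc c (N-1) (by omega) (by omega), e, pvSMax_last c hcne]

lemma pvTailA_eq (c : List (Int × Int)) (N : Int) (hN : N = c.length) (h1 : 1 ≤ N) :
    pvTailA c N = pvRef c N := by
  simp only [pvTailA]
  have hs1 : (PySem.List.pyRange 1 N 1).foldl
      (fun (p : List Int × List Int) i =>
        (PySem.List.pySetD p.1 i (min (PySem.List.pyGetD p.1 (i-1) 0) (PySem.List.pyGetD c i (0,0)).1),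
         PySem.List.pySetD p.2 i (max (PySem.List.pyGetD p.2 (i-1) 0) (PySem.List.pyGetD c i (0,0)).1)))
      (PySem.List.pySetD (List.replicate N.toNat 0) 0 (PySem.List.pyGetD c 0 (0,0)).1,
       PySem.List.pySetD (List.replicate N.toNat 0) 0 (PySem.List.pyGetD c 0 (0,0)).1)
    = ((PySem.List.pyRange 1 N 1).foldl
        (fun arr i => PySem.List.pySetD arr i (min (PySem.List.pyGetD arr (i-1) 0) (PySem.List.pyGetD c i (0,0)).1))
        (PySem.List.pySetD (List.replicate N.toNat 0) 0 (PySem.List.pyGetD c 0 (0,0)).1),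
       (PySem.List.pyRange 1 N 1).foldl
        (fun arr i => PySem.List.pySetD arr i (max (PySem.List.pyGetD arr (i-1) 0) (PySem.List.pyGetD c i (0,0)).1))
        (PySem.List.pySetD (List.replicate N.toNat 0) 0 (PySem.List.pyGetD c 0 (0,0)).1)) :=
    PySem.List.foldl_prod_mk
      (fun arr i => PySem.List.pySetD arr i (min (PySem.List.pyGetD arr (i-1) 0) (PySem.List.pyGetD c i (0,0)).1))
      (fun arr i => PySem.List.pySetD arr i (max (PySem.List.pyGetD arr (i-1) 0) (PySem.List.pyGetD c i (0,0)).1))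
      _ _ _
  have hs2 : (PySem.List.pyRange (N-2) (-1) (-1)).foldl
      (fun (p : List Int × List Int) i =>
        (PySem.List.pySetD p.1 i (min (PySem.List.pyGetD p.1 (i+1) 0) (PySem.List.pyGetD c i (0,0)).2),
         PySem.List.pySetD p.2 i (max (PySem.List.pyGetD p.2 (i+1) 0) (PySem.List.pyGetD c i (0,0)).2)))
      (PySem.List.pySetD (List.replicate N.toNat 0) (N-1) (PySem.List.pyGetD c (N-1) (0,0)).2,
       PySem.List.pySetD (List.replicate N.toNat 0) (N-1) (PySem.List.pyGetD c (N-1) (0,0)).2)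
    = ((PySem.List.pyRange (N-2) (-1) (-1)).foldl
        (fun arr i => PySem.List.pySetD arr i (min (PySem.List.pyGetD arr (i+1) 0) (PySem.List.pyGetD c i (0,0)).2))
        (PySem.List.pySetD (List.replicate N.toNat 0) (N-1) (PySem.List.pyGetD c (N-1) (0,0)).2),
       (PySem.List.pyRange (N-2) (-1) (-1)).foldl
        (fun arr i => PySem.List.pySetD arr i (max (PySem.List.pyGetD arr (i+1) 0) (PySem.List.pyGetD c i (0,0)).2))
        (PySem.List.pySetD (List.replicate N.toNat 0) (N-1) (PySem.List.pyGetD c (N-1) (0,0)).2)) :=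
    PySem.List.foldl_prod_mk
      (fun arr i => PySem.List.pySetD arr i (min (PySem.List.pyGetD arr (i+1) 0) (PySem.List.pyGetD c i (0,0)).2))
      (fun arr i => PySem.List.pySetD arr i (max (PySem.List.pyGetD arr (i+1) 0) (PySem.List.pyGetD c i (0,0)).2))
      _ _ _
  rw [hs1, hs2]
  refine Eq.trans (PySem.List.foldl_congr_mem _ _ (fun ans i => min ans (pvCand c i)) _ ?_) ?_
  · intro acc i hi
    rw [PySem.List.mem_pyRange_neg_one] at hi
    by_cases h0 : i = 0
    · subst h0
      rw [if_pos (show ((0:Int) == 0) = true from rfl), if_pos (show ((0:Int) == 0) = true from rfl),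
        pvBwdMinArr c N hN h1 0 le_rfl (by omega), pvBwdMaxArr c N hN h1 0 le_rfl (by omega)]
      rfl
    · rw [if_neg (by simp [h0]), if_neg (by simp [h0]),
        pvFwdMinArr c N hN h1 (i-1) (by omega) (by omega),
        pvFwdMaxArr c N hN h1 (i-1) (by omega) (by omega),
        pvBwdMinArr c N hN h1 i (by omega) (by omega),
        pvBwdMaxArr c N hN h1 i (by omega) (by omega)]
      simp only [pvCand]
      rw [if_neg (by simp [h0]), if_neg (by simp [h0])]
  · have hbase : (PySem.List.pyGetD c (N-1) (0,0)).1 - (PySem.List.pyGetD c 0 (0,0)).1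
        = (c.getD (N-1).toNat (0,0)).1 - (c.getD 0 (0,0)).1 := by
      rw [pvGetDc c (N-1) (by omega) (by omega), PySem.List.pyGetD_zero]
    rw [hbase, ← List.foldl_map, PySem.List.pyRange_neg_one_eq_reverse,
      show (-1:Int)+1 = 0 from rfl, show N-1+1 = N from by ring,
      List.map_reverse, pvFoldlMinReverse, List.foldl_map]
    rfl

-- the comparison function sorted2 uses for key pair (fst, snd)
def pvLt (a b : Int × Int) : Bool :=
  decide (a.1 < b.1) || (!decide (b.1 < a.1) && decide (a.2 < b.2))

lemma pvLt_iff (a b : Int × Int) :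
    pvLt a b = true ↔ (a.1 < b.1 ∨ (¬ b.1 < a.1 ∧ a.2 < b.2)) := by
  simp only [pvLt, Bool.or_eq_true, Bool.and_eq_true, Bool.not_eq_true',
    decide_eq_true_iff, decide_eq_false_iff_not]

lemma pvLt_asym (x y : Int × Int) (h : pvLt x y = true) : pvLt y x = false := by
  rw [pvLt_iff] at h
  simp only [Bool.eq_false_iff, ne_eq, pvLt_iff]
  omega

lemma pvLt_trans_neg (x y z : Int × Int) (h1 : pvLt y x = false) (h2 : pvLt z y = false) :
    pvLt z x = false := by
  simp only [Bool.eq_false_iff, ne_eq, pvLt_iff] at h1 h2 ⊢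
  omega

lemma pvInsertBy_pw (x : Int × Int) (ys : List (Int × Int))
    (h : ys.Pairwise (fun a b => pvLt b a = false)) :
    (PySem.List.insertBy pvLt x ys).Pairwise (fun a b => pvLt b a = false) := by
  induction ys with
  | nil =>
    simp [PySem.List.insertBy]
  | cons y t ih =>
    rw [List.pairwise_cons] at h
    obtain ⟨hy, ht⟩ := h
    by_cases hb : pvLt x y = true
    · rw [show PySem.List.insertBy pvLt x (y :: t) = x :: y :: t by
        simp [PySem.List.insertBy, hb]]
      refine List.Pairwise.cons ?_ (List.Pairwise.cons hy ht)
      intro z hz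
      rcases List.mem_cons.mp hz with rfl | hzt
      · exact pvLt_asym x z hb
      · exact pvLt_trans_neg x y z (pvLt_asym x y hb) (hy z hzt)
    · have hb' : pvLt x y = false := by
        exact Bool.eq_false_iff.mpr (by exact fun hc => hb hc)
      rw [show PySem.List.insertBy pvLt x (y :: t) = y :: PySem.List.insertBy pvLt x t by
        simp [PySem.List.insertBy, hb']]
      refine List.Pairwise.cons ?_ (ih ht)
      intro z hz
      have hz' : z ∈ x :: t := (PySem.List.insertBy_perm pvLt x t).mem_iff.mp hz
      rcases List.mem_cons.mp hz' with rfl | hzt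
      · exact hb'
      · exact hy z hzt

lemma pvFoldlInsert_pw : ∀ (xs acc : List (Int × Int)),
    acc.Pairwise (fun a b => pvLt b a = false) →
    (xs.foldl (fun acc x => PySem.List.insertBy pvLt x acc) acc).Pairwise
      (fun a b => pvLt b a = false) := by
  intro xs
  induction xs with
  | nil => intro acc h; exact h
  | cons x t ih =>
    intro acc h
    exact ih _ (pvInsertBy_pw x acc h)

lemma pvSorted2_eq (xs : List (Int × Int)) :
    PySem.List.sorted2 xs (fun p => p.1) (fun p => p.2) false
    = xs.foldl (fun acc x => PySem.List.insertBy pvLt x acc) [] := rfl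

-- the sorted pair list is nondecreasing in the first component
lemma pvPairwiseFst (xs : List (Int × Int)) :
    (PySem.List.sorted2 xs (fun p => p.1) (fun p => p.2) false).Pairwise
      (fun a b => a.1 ≤ b.1) := by
  rw [pvSorted2_eq]
  refine (pvFoldlInsert_pw xs [] (by simp)).imp ?_
  intro a b h
  simp only [Bool.eq_false_iff, ne_eq, pvLt_iff] at h
  omega

-- on a list sorted by first component, prefix max/min of first components are endpoints
lemma pvPMax_sorted (c : List (Int × Int)) (hpw : c.Pairwise (fun a b => a.1 ≤ b.1)) :
    ∀ k : Nat, k < c.length → pvPMax c k = (c.getD k (0,0)).1 := by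
  intro k
  induction k with
  | zero => intro _; rfl
  | succ k ih =>
    intro hk
    rw [pvPMax, ih (by omega)]
    have h := List.pairwise_iff_getElem.mp hpw k (k+1) (by omega) hk (by omega)
    rw [List.getD_eq_getElem _ _ (by omega : k < c.length),
      List.getD_eq_getElem _ _ hk]
    exact max_eq_right h

lemma pvPMin_sorted (c : List (Int × Int)) (hpw : c.Pairwise (fun a b => a.1 ≤ b.1)) :
    ∀ k : Nat, k < c.length → pvPMin c k = (c.getD 0 (0,0)).1 := by
  intro k
  induction k with
  | zero => intro _; rfl
  | succ k ih =>
    intro hk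
    rw [pvPMin, ih (by omega)]
    have h := List.pairwise_iff_getElem.mp hpw 0 (k+1) (by omega) hk (by omega)
    rw [List.getD_eq_getElem _ _ (by omega : 0 < c.length),
      List.getD_eq_getElem _ _ hk]
    exact min_eq_left h

-- B's backward sweep computes the running minimum of the same candidates
lemma pvSweepB (c : List (Int × Int)) (N : Int) (hN : N = c.length) (h1 : 1 ≤ N)
    (hPmax : ∀ k : Nat, k < c.length → pvPMax c k = (c.getD k (0,0)).1)
    (hPmin : ∀ k : Nat, k < c.length → pvPMin c k = (c.getD 0 (0,0)).1) :
    ∀ (k : Nat) (a : Int), a = (k : Int) → a ≤ N - 1 → ∀ (ans sm sM : Int),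
    min sm ((c.getD a.toNat (0,0)).2) = pvSMin c a.toNat →
    max sM ((c.getD a.toNat (0,0)).2) = pvSMax c a.toNat →
    (min ((PySem.List.pyRange a 0 (-1)).foldl
        (fun (q : Int × Int × Int) i =>
          (min q.1 (max (PySem.List.pyGetD c (i-1) (0,0)).1 (max q.2.2 (PySem.List.pyGetD c i (0,0)).2) -
             min (PySem.List.pyGetD c 0 (0,0)).1 (min q.2.1 (PySem.List.pyGetD c i (0,0)).2)),
           min q.2.1 (PySem.List.pyGetD c i (0,0)).2,
           max q.2.2 (PySem.List.pyGetD c i (0,0)).2)) (ans, sm, sM)).1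
      (max ((PySem.List.pyRange a 0 (-1)).foldl
        (fun (q : Int × Int × Int) i =>
          (min q.1 (max (PySem.List.pyGetD c (i-1) (0,0)).1 (max q.2.2 (PySem.List.pyGetD c i (0,0)).2) -
             min (PySem.List.pyGetD c 0 (0,0)).1 (min q.2.1 (PySem.List.pyGetD c i (0,0)).2)),
           min q.2.1 (PySem.List.pyGetD c i (0,0)).2,
           max q.2.2 (PySem.List.pyGetD c i (0,0)).2)) (ans, sm, sM)).2.2 (PySem.List.pyGetD c 0 (0,0)).2 -
       min ((PySem.List.pyRange a 0 (-1)).foldl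
        (fun (q : Int × Int × Int) i =>
          (min q.1 (max (PySem.List.pyGetD c (i-1) (0,0)).1 (max q.2.2 (PySem.List.pyGetD c i (0,0)).2) -
             min (PySem.List.pyGetD c 0 (0,0)).1 (min q.2.1 (PySem.List.pyGetD c i (0,0)).2)),
           min q.2.1 (PySem.List.pyGetD c i (0,0)).2,
           max q.2.2 (PySem.List.pyGetD c i (0,0)).2)) (ans, sm, sM)).2.1 (PySem.List.pyGetD c 0 (0,0)).2))
    = (PySem.List.pyRange a (-1) (-1)).foldl (fun ans i => min ans (pvCand c i)) ans := by
  intro k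
  induction k with
  | zero =>
    intro a ha haN ans sm sM hsm hsM
    subst ha
    simp only [Nat.cast_zero, Int.toNat_zero] at hsm hsM ⊢
    rw [PySem.List.pyRange_neg_one_eq_nil (by norm_num)]
    rw [PySem.List.pyRange_neg_one_cons (by norm_num : (-1:Int) < 0),
      PySem.List.pyRange_neg_one_eq_nil (by norm_num)]
    simp only [List.foldl_cons, List.foldl_nil]
    have h0 : PySem.List.pyGetD c 0 (0,0) = c.getD 0 (0,0) := by
      rw [PySem.List.pyGetD_zero]
    rw [h0, hsM, hsm, pvCand, if_pos (show ((0:Int) == 0) = true from rfl),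
      if_pos (show ((0:Int) == 0) = true from rfl)]
  | succ k ih =>
    intro a ha haN ans sm sM hsm hsM
    have ha1 : 1 ≤ a := by omega
    have haLen : a < (c.length : Int) := by omega
    rw [PySem.List.pyRange_neg_one_cons (by omega : (0:Int) < a),
      PySem.List.pyRange_neg_one_cons (by omega : (-1:Int) < a)]
    simp only [List.foldl_cons]
    have hga : PySem.List.pyGetD c a (0,0) = c.getD a.toNat (0,0) := pvGetDc c a (by omega) haLen
    have hm : min sm (PySem.List.pyGetD c a (0,0)).2 = pvSMin c a.toNat := by rw [hga]; exact hsm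
    have hM : max sM (PySem.List.pyGetD c a (0,0)).2 = pvSMax c a.toNat := by rw [hga]; exact hsM
    have hcand : max (PySem.List.pyGetD c (a-1) (0,0)).1 (max sM (PySem.List.pyGetD c a (0,0)).2) -
        min (PySem.List.pyGetD c 0 (0,0)).1 (min sm (PySem.List.pyGetD c a (0,0)).2) = pvCand c a := by
      rw [hm, hM, pvCand, if_neg (by simp; omega), if_neg (by simp; omega),
        pvGetDc c (a-1) (by omega) (by omega), PySem.List.pyGetD_zero,
        hPmax (a-1).toNat (by omega), hPmin (a-1).toNat (by omega)]
    rw [hcand]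
    refine ih (a-1) (by omega) (by omega) (min ans (pvCand c a))
      (min sm (PySem.List.pyGetD c a (0,0)).2) (max sM (PySem.List.pyGetD c a (0,0)).2) ?_ ?_
    · rw [hm]
      have := pvSMin_rec c (a-1).toNat (by omega)
      rw [show (a-1).toNat + 1 = a.toNat by omega] at this
      exact this.symm
    · rw [hM]
      have := pvSMax_rec c (a-1).toNat (by omega)
      rw [show (a-1).toNat + 1 = a.toNat by omega] at this
      exact this.symm

lemma pvTailB_eq (c : List (Int × Int)) (N : Int) (hN : N = c.length) (h1 : 1 ≤ N)
    (hpw : c.Pairwise (fun a b => a.1 ≤ b.1)) :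
    pvTailB c N = pvRef c N := by
  simp only [pvTailB]
  have hPmax := pvPMax_sorted c hpw
  have hPmin := pvPMin_sorted c hpw
  have hgN : PySem.List.pyGetD c (N-1) (0,0) = c.getD (N-1).toNat (0,0) :=
    pvGetDc c (N-1) (by omega) (by omega)
  have hsm : min (PySem.List.pyGetD c (N-1) (0,0)).2 ((c.getD (N-1).toNat (0,0)).2)
      = pvSMin c (N-1).toNat := by
    have hcne : c ≠ [] := by intro hc; rw [hc] at hN; simp at hN; omega
    rw [hgN, min_self, show (N-1).toNat = c.length - 1 by omega, pvSMin_last c hcne]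
  have hsM : max (PySem.List.pyGetD c (N-1) (0,0)).2 ((c.getD (N-1).toNat (0,0)).2)
      = pvSMax c (N-1).toNat := by
    have hcne : c ≠ [] := by intro hc; rw [hc] at hN; simp at hN; omega
    rw [hgN, max_self, show (N-1).toNat = c.length - 1 by omega, pvSMax_last c hcne]
  rw [pvSweepB c N hN h1 hPmax hPmin (N-1).toNat (N-1) (by omega) (by omega)
    ((PySem.List.pyGetD c (N-1) (0,0)).1 - (PySem.List.pyGetD c 0 (0,0)).1)
    (PySem.List.pyGetD c (N-1) (0,0)).2 (PySem.List.pyGetD c (N-1) (0,0)).2 hsm hsM]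
  have hbase : (PySem.List.pyGetD c (N-1) (0,0)).1 - (PySem.List.pyGetD c 0 (0,0)).1
      = (c.getD (N-1).toNat (0,0)).1 - (c.getD 0 (0,0)).1 := by
    rw [pvGetDc c (N-1) (by omega) (by omega), PySem.List.pyGetD_zero]
  rw [hbase, ← List.foldl_map, PySem.List.pyRange_neg_one_eq_reverse,
    show (-1:Int)+1 = 0 from rfl, show N-1+1 = N from by ring,
    List.map_reverse, pvFoldlMinReverse, List.foldl_map]
  rfl

-- ===== VERDICT (by name: the statement is the Claim_ definition above) =====
theorem min_possible_value_after_swaps_spec : Claim_equal_min_possible_value_after_swaps := by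
  intro A B hDom hPre
  obtain ⟨hne, hlen⟩ := hPre
  unfold Spec_min_possible_value_after_swaps
  have hl := pvSwapLen (PySem.List.pyRange 0 (A.length : Int) 1) A B
  have hclen : (pvC A B).length = A.length := by
    have hperm := PySem.List.sorted2_perm ((pvSwap A B).1.zip (pvSwap A B).2)
      (fun p : Int × Int => p.1) (fun p : Int × Int => p.2) false
    have := hperm.length_eq
    rw [pvC, this, List.length_zip]
    have h1 : (pvSwap A B).1.length = A.length := hl.1
    have h2 : (pvSwap A B).2.length = B.length := hl.2
    omega
  have hA1 : 1 ≤ (A.length : Int) := by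
    have := List.length_pos_iff.2 hne; omega
  have hpw : (pvC A B).Pairwise (fun a b => a.1 ≤ b.1) := by
    rw [pvC]; exact pvPairwiseFst _
  rw [pvPortA_rfl, pvPortB_rfl, pvCA_eq_pvC A B hlen,
    pvTailA_eq (pvC A B) A.length (by rw [hclen]) hA1,
    pvTailB_eq (pvC A B) A.length (by rw [hclen]) hA1 hpw]
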